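-- pv_equiv track=rewrite | github.com/tjrdbfl/Algorithm2 | greedy/matchorder/matchorder.py | matchorder
-- ===== SOURCE A (Python) =====
-- from bisect import bisect_left,bisect_right
--
-- def matchorder(n,russian,korean):
--     korean.sort()
--     wins=0
--     for i in range(n):
--         if korean[-1] < russian[i]: # 가장 레이팅이 높은 한국 선수가 이길 수 없는 경우
--             korean.pop(0) # 가장 레이팅이 낮은 선수를 출전시킨다.
--         else:
--             wins+=1 # 이길 수 있는 선수 중 가장 레이팅이 낮은 선수 출전시키기
--             korean.pop(bisect_left(korean,russian[i])) # russian[i] 보다는 크지만 가장 레이팅이 낮은 인덱스 반환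
--     return wins
-- ===== SOURCE B (Python) =====
-- def matchorder(n, russian, korean):
--     # Return-value equivalence only: A sorts/pops `korean` in place, B leaves its arguments untouched.
--     rs = sorted(russian[:max(0, n)])
--     ks = sorted(korean)
--     wins = 0
--     j = 0
--     m = len(ks)
--     for r in rs:
--         while j < m and ks[j] < r:
--             j += 1
--         if j >= m:
--             break
--         wins += 1
--         j += 1
--     return wins
-- ===== Notes on version B (the rewrite author's own statement) =====
-- stated objective: alternative
-- what changed: Instead of simulating each match in the given order with repeated list.pop(0)/pop(bisect) on a mutating sorted list, B sorts both the first n russians and the koreans once and counts wins with a single two-pointer sweep (order-invariance of the greedy proved in Lean).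
import Mathlib
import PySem

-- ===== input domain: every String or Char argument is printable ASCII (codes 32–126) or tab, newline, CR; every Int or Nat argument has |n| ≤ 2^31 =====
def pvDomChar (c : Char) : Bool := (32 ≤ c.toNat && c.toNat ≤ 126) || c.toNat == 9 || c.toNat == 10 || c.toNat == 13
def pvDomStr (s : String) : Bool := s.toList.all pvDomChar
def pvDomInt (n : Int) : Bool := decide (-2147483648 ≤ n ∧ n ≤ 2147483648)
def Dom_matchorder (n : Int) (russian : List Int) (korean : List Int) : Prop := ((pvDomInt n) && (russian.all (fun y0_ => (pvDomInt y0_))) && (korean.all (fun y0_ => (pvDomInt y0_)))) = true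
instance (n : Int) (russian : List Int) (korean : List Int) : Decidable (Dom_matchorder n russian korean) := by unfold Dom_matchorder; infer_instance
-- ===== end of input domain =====

-- B replaces A's in-order match-by-match simulation (repeated pop(0)/pop(bisect) on a mutating
-- sorted list) by sorting both sides once and counting wins with a single two-pointer sweep.
-- Equivalence is about the RETURN value only: Python A sorts/pops `korean` in place, B does not mutate.

-- ===== PORT A =====
-- one iteration of A's `for i in range(n)` loop; state = (korean list, wins)
def aStep (russian : List Int) (st : List Int × Int) (i : Int) : List Int × Int :=
  let r := PySem.List.pyGetD russian i 0
  if PySem.List.pyGetD st.1 (-1) 0 < r then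
    (((PySem.List.pop? st.1 0).map Prod.snd).getD st.1, st.2)
  else
    (((PySem.List.pop? st.1 ((PySem.List.bisectLeft st.1 r : Nat) : Int)).map Prod.snd).getD st.1,
      st.2 + 1)

def matchorder (n : Int) (russian : List Int) (korean : List Int) : Int :=
  ((PySem.List.pyRange 0 n).foldl (aStep russian)
    (PySem.List.sorted korean (fun x => x), (0 : Int))).2

-- ===== PORT B =====
-- Source B's `for r in rs` loop; the inner `while j < m and ks[j] < r` pointer advance is the
-- dropWhile on the remaining suffix of ks; `break` when the suffix is exhausted.
def bLoop : List Int → List Int → Int → Int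
  | [], _, wins => wins
  | r :: rs, ks, wins =>
    match ks.dropWhile (fun k => decide (k < r)) with
    | [] => wins
    | _ :: t => bLoop rs t (wins + 1)

def matchorder_alt (n : Int) (russian : List Int) (korean : List Int) : Int :=
  bLoop (PySem.List.sorted (PySem.List.slice russian none (some (max 0 n))) (fun x => x))
    (PySem.List.sorted korean (fun x => x)) 0

-- ===== PRECONDITION & SPEC =====
-- A raises IndexError iff n exceeds the length of either list (russian[i] for i < n;
-- korean loses one element per round and korean[-1] needs it nonempty); Pre_ is exact.
def Pre_matchorder (n : Int) (russian : List Int) (korean : List Int) : Prop :=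
  n ≤ (russian.length : Int) ∧ n ≤ (korean.length : Int)
instance (n : Int) (russian : List Int) (korean : List Int) : Decidable (Pre_matchorder n russian korean) := by unfold Pre_matchorder; infer_instance

def pvWitness_matchorder : Int × List Int × List Int := (2, ([5, 10], [3, 7, 12]))

def Spec_matchorder (n : Int) (russian : List Int) (korean : List Int) (out : Int) : Prop := out = matchorder_alt n russian korean
instance (n : Int) (russian : List Int) (korean : List Int) (out : Int) : Decidable (Spec_matchorder n russian korean out) := by unfold Spec_matchorder; infer_instance

-- ===== CLAIM (what is proved, stated in full; the proofs are below) =====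
def Claim_equal_matchorder : Prop := ∀ (n : Int) (russian : List Int) (korean : List Int), Dom_matchorder n russian korean → Pre_matchorder n russian korean → Spec_matchorder n russian korean (matchorder n russian korean)

-- ===== LEMMAS AND PROOFS =====

-- Abstract greedy model both ports are reduced to: ks is the sorted pool of korean ratings;
-- each russian r either (no-one can win) discards the minimum, or removes the least k ≥ r.
def fmodel : List Int → List Int → Int
  | [], _ => 0
  | r :: rs, ks =>
    if ks.all (fun k => decide (k < r)) then fmodel rs ks.tail
    else 1 + fmodel rs (ks.eraseP (fun k => decide (r ≤ k)))

-- A's loop body as a function of the current russian value (aStep with the index lookup done)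
def aStep2 (st : List Int × Int) (r : Int) : List Int × Int :=
  if PySem.List.pyGetD st.1 (-1) 0 < r then
    (((PySem.List.pop? st.1 0).map Prod.snd).getD st.1, st.2)
  else
    (((PySem.List.pop? st.1 ((PySem.List.bisectLeft st.1 r : Nat) : Int)).map Prod.snd).getD st.1,
      st.2 + 1)

theorem aStep_eq_aStep2 (russian : List Int) (st : List Int × Int) (i : Int) :
    aStep russian st i = aStep2 st (PySem.List.pyGetD russian i 0) := rfl

theorem getLast_isMax (ks : List Int) (hs : List.Pairwise (· ≤ ·) ks) (h : ks ≠ [])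
    (x : Int) (hx : x ∈ ks) : x ≤ ks.getLast h := by
  induction ks with
  | nil => exact absurd rfl h
  | cons k t ih =>
    cases t with
    | nil => simp at hx; simp [hx]
    | cons k2 t2 =>
      rw [List.getLast_cons (by simp)]
      rcases List.mem_cons.mp hx with rfl | hx2
      · exact le_trans (List.rel_of_pairwise_cons hs (List.getLast_mem _)) (le_refl _)
      · exact ih (List.Pairwise.tail hs) (by simp) hx2

theorem eraseIdx_eq_eraseP (r : Int) : ∀ (ks : List Int) (k : Nat) (hk : k < ks.length),
    (∀ j (hj : j < ks.length), j < k → ks[j] < r) → r ≤ ks[k] →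
    ks.eraseIdx k = ks.eraseP (fun x => decide (r ≤ x)) := by
  intro ks
  induction ks with
  | nil => intro k hk; simp at hk
  | cons x t ih =>
    intro k hk hlt hge
    cases k with
    | zero => simp at hge; simp [hge]
    | succ k =>
      have h0 : x < r := hlt 0 (by simp) (by omega)
      have hd : (decide (r ≤ x)) = false := by simp; omega
      rw [List.eraseIdx_cons_succ, List.eraseP_cons, hd]
      simp only [cond_false]
      congr 1
      rw [ih k (by simpa using hk) (fun j hj hjk => by
            have := hlt (j+1) (by simpa using hj) (by omega)
            simpa using this) (by simpa using hge)]

theorem eraseP_congr' (p q : Int → Bool) : ∀ (l : List Int), (∀ x ∈ l, p x = q x) →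
    l.eraseP p = l.eraseP q := by
  intro l
  induction l with
  | nil => intro; rfl
  | cons x t ih =>
    intro h
    simp only [List.eraseP_cons, h x (by simp)]
    cases hq : q x
    · simp [ih (fun y hy => h y (by simp [hy]))]
    · simp

theorem dropWhile_head_false {p : Int → Bool} : ∀ {ks : List Int} {k : Int} {t : List Int},
    ks.dropWhile p = k :: t → p k = false := by
  intro ks
  induction ks with
  | nil => intro k t h; simp at h
  | cons a l ih =>
    intro k t h
    by_cases hp : p a
    · rw [List.dropWhile_cons_of_pos hp] at h; exact ih h
    · rw [List.dropWhile_cons_of_neg hp] at h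
      cases h
      exact Bool.eq_false_iff.mpr hp

theorem aStep2_eq_model (ks : List Int) (w r : Int) (hs : List.Pairwise (· ≤ ·) ks) (h : ks ≠ []) :
    aStep2 (ks, w) r =
      (if ks.all (fun k => decide (k < r)) then ks.tail else ks.eraseP (fun k => decide (r ≤ k)),
       if ks.all (fun k => decide (k < r)) then w else w + 1) := by
  unfold aStep2
  simp only [PySem.List.pyGetD_neg_one _ _ h]
  by_cases c : ks.getLast h < r
  · have hall : ks.all (fun k => decide (k < r)) = true := by
      simp only [List.all_eq_true, decide_eq_true_eq]
      exact fun x hx => lt_of_le_of_lt (getLast_isMax ks hs h x hx) c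
    rw [if_pos c, hall, if_pos rfl, if_pos rfl]
    cases ks with
    | nil => exact absurd rfl h
    | cons k0 t0 => simp [PySem.List.pop?_zero_cons]
  · have hall : ks.all (fun k => decide (k < r)) = false := by
      simp only [List.all_eq_false, decide_eq_true_eq]
      exact ⟨ks.getLast h, List.getLast_mem h, by simpa using c⟩
    rw [if_neg c, hall]
    simp only [Bool.false_eq_true, if_false]
    obtain ⟨hkle, hlt, hge⟩ := PySem.List.bisectLeft_spec ks r hs
    have hklen : PySem.List.bisectLeft ks r < ks.length := by
      rcases lt_or_eq_of_le hkle with h' | h'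
      · exact h'
      · exfalso
        have hlen : 0 < ks.length := List.length_pos_of_ne_nil h
        have := hlt (ks.length - 1) (by omega) (by omega)
        rw [← List.getLast_eq_getElem h] at this
        omega
    rw [PySem.List.pop?_natCast ks _ hklen]
    simp only [Option.map_some, Option.getD_some]
    rw [eraseIdx_eq_eraseP r ks _ hklen (fun j hj hjk => hlt j hj hjk) (hge _ hklen (le_refl _))]

theorem aloop_eq_fmodel (rs : List Int) : ∀ (ks : List Int) (w : Int),
    List.Pairwise (· ≤ ·) ks → rs.length ≤ ks.length →
    (rs.foldl aStep2 (ks, w)).2 = w + fmodel rs ks := by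
  induction rs with
  | nil => intro ks w _ _; simp [fmodel]
  | cons r rs ih =>
    intro ks w hs hlen
    have hne : ks ≠ [] := by
      intro h; rw [h] at hlen; simp at hlen
    rw [List.foldl_cons, aStep2_eq_model ks w r hs hne]
    by_cases hall : ks.all (fun k => decide (k < r)) = true
    · rw [if_pos hall, if_pos hall]
      rw [ih ks.tail w (List.Pairwise.tail hs) (by rw [List.length_tail]; simp at hlen ⊢; omega)]
      simp only [fmodel, hall, if_true]
    · rw [if_neg hall, if_neg hall]
      obtain ⟨x, hx, hxr⟩ := by
        simpa only [List.all_eq_false, decide_eq_true_eq] using (Bool.eq_false_iff.mpr hall)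
      have hxge : (fun k => decide (r ≤ k)) x = true := by simp; omega
      have hlen' : (ks.eraseP (fun k => decide (r ≤ k))).length = ks.length - 1 :=
        List.length_eraseP_of_mem hx hxge
      rw [ih _ (w + 1) (List.Pairwise.sublist (List.eraseP_sublist) hs) (by simp at hlen; omega)]
      simp only [fmodel, hall]
      simp only [Bool.false_eq_true, if_false]
      ring

theorem fmodel_junk (rs : List Int) : ∀ (ks : List Int),
    (∀ x ∈ ks, ∀ r ∈ rs, x < r) → fmodel rs ks = 0 := by
  induction rs with
  | nil => intro ks _; rfl
  | cons r rs ih =>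
    intro ks h
    have hall : ks.all (fun k => decide (k < r)) = true := by
      simp only [List.all_eq_true, decide_eq_true_eq]
      exact fun x hx => h x hx r (by simp)
    simp only [fmodel, hall, if_true]
    exact ih ks.tail (fun x hx r' hr' => h x (List.mem_of_mem_tail hx) r' (by simp [hr']))

theorem fmodel_low_prefix (rs : List Int) : ∀ (low ks : List Int),
    (∀ x ∈ low, ∀ r ∈ rs, x < r) → List.Pairwise (· ≤ ·) rs →
    fmodel rs (low ++ ks) = fmodel rs ks := by
  induction rs with
  | nil => intro low ks _ _; rfl
  | cons r rs ih =>
    intro low ks hlow hsort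
    have hlowr : ∀ x ∈ low, x < r := fun x hx => hlow x hx r (by simp)
    have hcond : ((low ++ ks).all (fun k => decide (k < r))) = (ks.all (fun k => decide (k < r))) := by
      simp only [List.all_append, Bool.and_eq_right_iff_imp, List.all_eq_true, decide_eq_true_eq]
      intro _; exact hlowr
    by_cases hall : ks.all (fun k => decide (k < r)) = true
    · have hjunkL : ∀ x ∈ (low ++ ks).tail, ∀ r' ∈ rs, x < r' := by
        intro x hx r' hr'
        have hxr : x < r := by
          have := List.mem_of_mem_tail hx
          rcases List.mem_append.mp this with h' | h'
          · exact hlowr x h'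
          · exact by simpa using (List.all_eq_true.mp hall x h')
        exact lt_of_lt_of_le hxr (List.rel_of_pairwise_cons hsort hr')
      have hjunkR : ∀ x ∈ ks.tail, ∀ r' ∈ rs, x < r' := by
        intro x hx r' hr'
        have hxr : x < r := by simpa using (List.all_eq_true.mp hall x (List.mem_of_mem_tail hx))
        exact lt_of_lt_of_le hxr (List.rel_of_pairwise_cons hsort hr')
      simp only [fmodel, hcond, hall, if_true]
      rw [fmodel_junk rs _ hjunkL, fmodel_junk rs _ hjunkR]
    · have hallL : ((low ++ ks).all (fun k => decide (k < r))) = false := by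
        rw [hcond]; exact Bool.eq_false_iff.mpr hall
      simp only [fmodel, hallL, Bool.eq_false_iff.mpr hall, Bool.false_eq_true, if_false]
      rw [List.eraseP_append_right _ (fun x hx => by
        simp only [decide_eq_true_eq]; have := hlowr x hx; omega)]
      rw [ih low _ (fun x hx r' hr' => hlow x hx r' (by simp [hr'])) (List.Pairwise.tail hsort)]

theorem bLoop_eq_fmodel (rs : List Int) : ∀ (ks : List Int) (w : Int),
    List.Pairwise (· ≤ ·) rs → List.Pairwise (· ≤ ·) ks →
    bLoop rs ks w = w + fmodel rs ks := by
  induction rs with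
  | nil => intro ks w _ _; simp [bLoop, fmodel]
  | cons r rs ih =>
    intro ks w hsr hsk
    rw [bLoop]
    cases hdw : ks.dropWhile (fun k => decide (k < r)) with
    | nil =>
      have hall : ks.all (fun k => decide (k < r)) = true := by
        rw [List.all_eq_true]
        exact List.dropWhile_eq_nil_iff.mp hdw
      simp only [fmodel, hall, if_true]
      rw [fmodel_junk rs ks.tail (fun x hx r' hr' => by
        have hxr : x < r := by simpa using (List.all_eq_true.mp hall x (List.mem_of_mem_tail hx))
        exact lt_of_lt_of_le hxr (List.rel_of_pairwise_cons hsr hr'))]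
      omega
    | cons k t =>
      have hks : ks.takeWhile (fun k => decide (k < r)) ++ k :: t = ks := by
        rw [← hdw]; exact List.takeWhile_append_dropWhile
      have hkge : r ≤ k := by
        have := dropWhile_head_false hdw; simp at this; omega
      have hall : ks.all (fun k => decide (k < r)) = false := by
        rw [List.all_eq_false]
        exact ⟨k, by rw [← hks]; simp, by simp; omega⟩
      simp only [fmodel, hall, Bool.false_eq_true, if_false]
      have htw : ∀ x ∈ ks.takeWhile (fun k => decide (k < r)), x < r :=
        fun x hx => by simpa using List.mem_takeWhile_imp hx
      have her : ks.eraseP (fun k => decide (r ≤ k)) =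
          ks.takeWhile (fun k => decide (k < r)) ++ t := by
        conv_lhs => rw [← hks]
        rw [List.eraseP_append_right _ (fun x hx => by
          simp only [decide_eq_true_eq]; have := htw x hx; omega)]
        rw [List.eraseP_cons_of_pos (by simp only [decide_eq_true_eq]; omega)]
      rw [her, fmodel_low_prefix rs _ t (fun x hx r' hr' =>
        lt_of_lt_of_le (htw x hx) (List.rel_of_pairwise_cons hsr hr')) (List.Pairwise.tail hsr)]
      have hst : List.Pairwise (· ≤ ·) t := by
        have h1 : List.Sublist (k :: t) ks := by rw [← hdw]; exact List.dropWhile_sublist _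
        exact List.Pairwise.tail (List.Pairwise.sublist h1 hsk)
      rw [ih t (w + 1) (List.Pairwise.tail hsr) hst]
      omega

theorem all_of_sublist (p : Int → Bool) {l1 l2 : List Int} (h : List.Sublist l1 l2)
    (h2 : l2.all p = true) : l1.all p = true :=
  List.all_eq_true.mpr (fun x hx => List.all_eq_true.mp h2 x (h.subset hx))

theorem eraseP_keep_high (a b : Int) : ∀ (ks : List Int),
    List.Pairwise (· ≤ ·) ks → (∃ x ∈ ks, b ≤ x ∧ x < a) → (∃ y ∈ ks, a ≤ y) →
    ∃ y ∈ ks.eraseP (fun k => decide (b ≤ k)), a ≤ y := by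
  intro ks
  induction ks with
  | nil => intro _ hx; simp at hx
  | cons k t ih =>
    intro hs hmid hhigh
    obtain ⟨x, hx, hbx, hxa⟩ := hmid
    obtain ⟨y, hy, hay⟩ := hhigh
    have hka : k < a := by
      rcases List.mem_cons.mp hx with rfl | hx'
      · exact hxa
      · exact lt_of_le_of_lt (List.rel_of_pairwise_cons hs hx') hxa
    have hyt : y ∈ t := by
      rcases List.mem_cons.mp hy with rfl | hy'
      · omega
      · exact hy'
    by_cases hkb : b ≤ k
    · rw [List.eraseP_cons_of_pos (by simpa using hkb)]
      exact ⟨y, hyt, hay⟩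
    · rw [List.eraseP_cons_of_neg (by simpa using hkb)]
      have hxt : x ∈ t := by
        rcases List.mem_cons.mp hx with rfl | hx'
        · omega
        · exact hx'
      obtain ⟨y', hy', hay'⟩ := ih (List.Pairwise.tail hs) ⟨x, hxt, hbx, hxa⟩ ⟨y, hyt, hay⟩
      exact ⟨y', List.mem_cons_of_mem k hy', hay'⟩

theorem eraseP_keep_mid (a b : Int) : ∀ (ks : List Int),
    List.Pairwise (· ≤ ·) ks → (∃ x ∈ ks, b ≤ x ∧ x < a) →
    ∃ x ∈ ks.eraseP (fun k => decide (a ≤ k)), b ≤ x ∧ x < a := by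
  intro ks
  induction ks with
  | nil => intro _ hx; simp at hx
  | cons k t ih =>
    intro hs hmid
    obtain ⟨x, hx, hbx, hxa⟩ := hmid
    have hka : k < a := by
      rcases List.mem_cons.mp hx with rfl | hx'
      · exact hxa
      · exact lt_of_le_of_lt (List.rel_of_pairwise_cons hs hx') hxa
    rw [List.eraseP_cons_of_neg (by simpa using not_le.mpr hka)]
    rcases List.mem_cons.mp hx with rfl | hx'
    · exact ⟨x, List.mem_cons_self, hbx, hxa⟩
    · obtain ⟨x', hx'', h1, h2⟩ := ih (List.Pairwise.tail hs) ⟨x, hx', hbx, hxa⟩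
      exact ⟨x', List.mem_cons_of_mem k hx'', h1, h2⟩

theorem eraseP_comm_mid (a b : Int) : ∀ (ks : List Int),
    List.Pairwise (· ≤ ·) ks → (∃ x ∈ ks, b ≤ x ∧ x < a) →
    (ks.eraseP (fun k => decide (a ≤ k))).eraseP (fun k => decide (b ≤ k)) =
      (ks.eraseP (fun k => decide (b ≤ k))).eraseP (fun k => decide (a ≤ k)) := by
  intro ks
  induction ks with
  | nil => intro _ hx; simp at hx
  | cons k t ih =>
    intro hs hmid
    obtain ⟨x, hx, hbx, hxa⟩ := hmid
    have hka : k < a := by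
      rcases List.mem_cons.mp hx with rfl | hx'
      · exact hxa
      · exact lt_of_le_of_lt (List.rel_of_pairwise_cons hs hx') hxa
    by_cases hkb : b ≤ k
    · rw [List.eraseP_cons_of_neg (by simpa using not_le.mpr hka),
          List.eraseP_cons_of_pos (by simpa using hkb),
          List.eraseP_cons_of_pos (by simpa using hkb)]
    · have hxt : x ∈ t := by
        rcases List.mem_cons.mp hx with rfl | hx'
        · omega
        · exact hx'
      rw [List.eraseP_cons_of_neg (by simpa using not_le.mpr hka),
          List.eraseP_cons_of_neg (by simpa using hkb),
          List.eraseP_cons_of_neg (by simpa using hkb),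
          List.eraseP_cons_of_neg (by simpa using not_le.mpr hka)]
      rw [ih (List.Pairwise.tail hs) ⟨x, hxt, hbx, hxa⟩]

theorem fmodel_swap_le (a b : Int) (l : List Int) (k0 : Int) (t0 : List Int) (hba : b ≤ a)
    (hs : List.Pairwise (· ≤ ·) (k0 :: t0)) (hlen : 2 ≤ (k0 :: t0).length) :
    fmodel (a :: b :: l) (k0 :: t0) = fmodel (b :: a :: l) (k0 :: t0) := by
  have ht0 : t0 ≠ [] := by
    intro h; rw [h] at hlen; simp at hlen
  by_cases hallA : (k0 :: t0).all (fun k => decide (k < a)) = true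
  · by_cases hallB : (k0 :: t0).all (fun k => decide (k < b)) = true
    · -- both lose twice
      have htA : (k0 :: t0).tail.all (fun k => decide (k < a)) = true :=
        all_of_sublist _ (List.tail_sublist (k0 :: t0)) hallA
      have htB : (k0 :: t0).tail.all (fun k => decide (k < b)) = true :=
        all_of_sublist _ (List.tail_sublist (k0 :: t0)) hallB
      simp only [fmodel, hallA, hallB, htA, htB, if_true]
    · -- a loses, b wins
      obtain ⟨x, hxm, hxb⟩ : ∃ x ∈ (k0 :: t0), b ≤ x := by
        obtain ⟨x, h1, h2⟩ := List.all_eq_false.mp (Bool.eq_false_iff.mpr hallB)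
        exact ⟨x, h1, by simpa using h2⟩
      have hwB : ¬ t0.all (fun k => decide (k < b)) = true := by
        rcases List.mem_cons.mp hxm with rfl | hxt
        · -- x = k0 is the minimum: every element of t0 is ≥ b; t0 nonempty
          cases t0 with
          | nil => exact absurd rfl ht0
          | cons h1 t1 =>
            have : b ≤ h1 := le_trans hxb (List.rel_of_pairwise_cons hs (by simp))
            simp only [List.all_cons, Bool.and_eq_true, decide_eq_true_eq]
            omega
        · simp only [List.all_eq_true, not_forall]
          exact ⟨x, hxt, by simp; omega⟩
      have hallB' : t0.all (fun k => decide (k < b)) = false := Bool.eq_false_iff.mpr hwB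
      have hallA2 : ((k0 :: t0).eraseP (fun k => decide (b ≤ k))).all (fun k => decide (k < a)) = true :=
        all_of_sublist _ List.eraseP_sublist hallA
      have htaileq : ((k0 :: t0).eraseP (fun k => decide (b ≤ k))).tail =
          t0.eraseP (fun k => decide (b ≤ k)) := by
        by_cases hk0b : b ≤ k0
        · rw [List.eraseP_cons_of_pos (by simpa using hk0b)]
          cases t0 with
          | nil => exact absurd rfl ht0
          | cons h1 t1 =>
            have : b ≤ h1 := le_trans hk0b (List.rel_of_pairwise_cons hs (by simp))
            rw [List.eraseP_cons_of_pos (by simpa using this)]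
            rfl
        · rw [List.eraseP_cons_of_neg (by simpa using hk0b)]
          rfl
      simp only [fmodel, hallA, hallB, hallA2, hallB', Bool.false_eq_true, if_false, if_true,
        List.tail_cons]
      rw [htaileq]
  · -- a wins in the first position; b ≤ a, so b also wins first
    have hallB : (k0 :: t0).all (fun k => decide (k < b)) = false := by
      obtain ⟨y, h1, h2⟩ := List.all_eq_false.mp (Bool.eq_false_iff.mpr hallA)
      exact List.all_eq_false.mpr ⟨y, h1, by simp at h2 ⊢; omega⟩
    obtain ⟨y, hym, hay⟩ : ∃ y ∈ (k0 :: t0), a ≤ y := by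
      obtain ⟨y, h1, h2⟩ := List.all_eq_false.mp (Bool.eq_false_iff.mpr hallA)
      exact ⟨y, h1, by simpa using h2⟩
    have hallA' : (k0 :: t0).all (fun k => decide (k < a)) = false := Bool.eq_false_iff.mpr hallA
    by_cases hmid : ∃ x ∈ (k0 :: t0), b ≤ x ∧ x < a
    · -- distinct elements are removed; removals commute
      obtain ⟨xm, hxm, h1, h2⟩ := eraseP_keep_mid a b (k0 :: t0) hs hmid
      have hKaB : ((k0 :: t0).eraseP (fun k => decide (a ≤ k))).all (fun k => decide (k < b)) = false :=
        List.all_eq_false.mpr ⟨xm, hxm, by simp; omega⟩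
      obtain ⟨yh, hyh, hyh2⟩ := eraseP_keep_high a b (k0 :: t0) hs hmid ⟨y, hym, hay⟩
      have hKbA : ((k0 :: t0).eraseP (fun k => decide (b ≤ k))).all (fun k => decide (k < a)) = false :=
        List.all_eq_false.mpr ⟨yh, hyh, by simp; omega⟩
      simp only [fmodel, hallA', hallB, hKaB, hKbA, Bool.false_eq_true, if_false]
      rw [eraseP_comm_mid a b (k0 :: t0) hs hmid]
    · -- no element in [b, a): the two predicates agree on every element of (k0 :: t0)
      have hpq : ∀ x ∈ (k0 :: t0), (decide (b ≤ x)) = (decide (a ≤ x)) := by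
        intro x hxm
        by_cases hbx : b ≤ x
        · have : a ≤ x := by
            by_contra hax
            exact hmid ⟨x, hxm, hbx, by omega⟩
          simp [hbx, this]
        · simp [hbx, show ¬ a ≤ x by omega]
      have hKeq : (k0 :: t0).eraseP (fun k => decide (b ≤ k)) = (k0 :: t0).eraseP (fun k => decide (a ≤ k)) :=
        eraseP_congr' _ _ (k0 :: t0) hpq
      have hpq2 : ∀ x ∈ (k0 :: t0).eraseP (fun k => decide (a ≤ k)),
          (decide (x < b)) = (decide (x < a)) := by
        intro x hxm
        have hxks : x ∈ (k0 :: t0) := (List.eraseP_sublist).subset hxm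
        by_cases hxb : x < b
        · simp [hxb, show x < a by omega]
        · have : ¬ x < a := by
            by_contra hxa
            exact hmid ⟨x, hxks, by omega, hxa⟩
          simp [hxb, this]
      have hall2 : (((k0 :: t0).eraseP (fun k => decide (a ≤ k))).all (fun k => decide (k < b))) =
          (((k0 :: t0).eraseP (fun k => decide (a ≤ k))).all (fun k => decide (k < a))) := by
        rw [Bool.eq_iff_iff, List.all_eq_true, List.all_eq_true]
        constructor
        · intro h x hx; rw [← hpq2 x hx]; exact h x hx
        · intro h x hx; rw [hpq2 x hx]; exact h x hx
      simp only [fmodel, hallA', hallB, Bool.false_eq_true, if_false]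
      rw [hKeq]
      congr 1
      by_cases h2 : (((k0 :: t0).eraseP (fun k => decide (a ≤ k))).all (fun k => decide (k < b))) = true
      · rw [if_pos h2, if_pos (hall2 ▸ h2)]
      · rw [if_neg h2, if_neg (fun hc => h2 (hall2.symm ▸ hc))]
        rw [eraseP_congr' (fun x => decide (b ≤ x)) (fun x => decide (a ≤ x))
          ((k0 :: t0).eraseP (fun k => decide (a ≤ k)))
          (fun x hx => hpq x ((List.eraseP_sublist).subset hx))]

theorem fmodel_swap (a b : Int) (l ks : List Int) (hs : List.Pairwise (· ≤ ·) ks)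
    (hlen : 2 ≤ ks.length) : fmodel (a :: b :: l) ks = fmodel (b :: a :: l) ks := by
  cases ks with
  | nil => simp at hlen
  | cons k0 t0 =>
    rcases le_total b a with h | h
    · exact fmodel_swap_le a b l k0 t0 h hs hlen
    · exact (fmodel_swap_le b a l k0 t0 h hs hlen).symm

theorem fmodel_perm {rs rs' : List Int} (hp : rs.Perm rs') : ∀ (ks : List Int),
    List.Pairwise (· ≤ ·) ks → rs.length ≤ ks.length → fmodel rs ks = fmodel rs' ks := by
  induction hp with
  | nil => intro ks _ _; rfl
  | cons x hp ih =>
    intro ks hs hlen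
    simp only [fmodel]
    by_cases hall : ks.all (fun k => decide (k < x)) = true
    · rw [if_pos hall, if_pos hall]
      exact ih ks.tail (List.Pairwise.tail hs)
        (by rw [List.length_tail]; simp at hlen; omega)
    · rw [if_neg hall, if_neg hall]
      obtain ⟨z, hz, hz2⟩ := List.all_eq_false.mp (Bool.eq_false_iff.mpr hall)
      have hlen' : (ks.eraseP (fun k => decide (x ≤ k))).length = ks.length - 1 :=
        List.length_eraseP_of_mem hz (by simp at hz2 ⊢; omega)
      congr 1
      exact ih _ (List.Pairwise.sublist List.eraseP_sublist hs) (by simp at hlen; omega)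
  | swap u v l =>
    intro ks hs hlen
    exact fmodel_swap v u l ks hs (by simp at hlen; omega)
  | trans h1 h2 ih1 ih2 =>
    intro ks hs hlen
    rw [ih1 ks hs hlen, ih2 ks hs (by rw [← h1.length_eq]; exact hlen)]

-- ===== VERDICT (by name: the statement is the Claim_ definition above) =====
theorem matchorder_spec : Claim_equal_matchorder := by
  intro n russian korean _ hpre
  obtain ⟨hr, hk⟩ := hpre
  unfold Spec_matchorder matchorder matchorder_alt
  have hsk : List.Pairwise (· ≤ ·) (PySem.List.sorted korean (fun x => x)) := by
    simpa using PySem.List.sorted_pairwise korean (fun x => x)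
  have hsklen : (PySem.List.sorted korean (fun x => x)).length = korean.length :=
    PySem.List.length_sorted korean _ _
  have hxslen : (russian.take n.toNat).length = n.toNat := by
    rw [List.length_take]; omega
  -- A's loop over indices range(n) is a fold of aStep2 over the first n russians
  have h1 : (PySem.List.pyRange 0 n).foldl (aStep russian)
      (PySem.List.sorted korean (fun x => x), (0 : Int)) =
      (russian.take n.toNat).foldl aStep2 (PySem.List.sorted korean (fun x => x), (0 : Int)) := by
    have hrange : PySem.List.pyRange 0 n =
        PySem.List.pyRange 0 ((russian.take n.toNat).length : Int) := by
      rw [PySem.List.pyRange_one, PySem.List.pyRange_one, hxslen]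
      congr 2
      omega
    rw [hrange]
    rw [PySem.List.foldl_congr_mem _ (aStep russian) (fun st i =>
        aStep2 st (PySem.List.pyGetD (russian.take n.toNat) i 0)) _ (by
      intro st i hi
      have hi' := (PySem.List.mem_pyRange_one).mp hi
      have hilen : i < ((russian.take n.toNat).length : Int) := hi'.2
      have hi0 : 0 ≤ i := hi'.1
      rw [aStep_eq_aStep2]
      congr 1
      rw [PySem.List.pyGetD_eq_getElem russian 0 hi0
            (by rw [hxslen] at hilen; omega),
          PySem.List.pyGetD_eq_getElem (russian.take n.toNat) 0 hi0 hilen]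
      exact (List.getElem_take).symm)]
    rw [PySem.List.foldl_pyRange_pyGetD' (russian.take n.toNat) 0 aStep2 _ (le_refl 0)]
    simp only [Int.toNat_zero, List.drop_zero]
  rw [h1]
  rw [aloop_eq_fmodel (russian.take n.toNat) _ 0 hsk (by omega)]
  -- A's in-order processing equals processing the same russians in sorted order
  rw [fmodel_perm (PySem.List.sorted_perm (russian.take n.toNat) (fun x => x) false).symm
      _ hsk (by rw [PySem.List.length_sorted]; omega)]
  -- B's slice is the same take
  have hslice : PySem.List.slice russian none (some (max 0 n)) = russian.take n.toNat := by
    rw [PySem.List.slice_to russian (le_max_left 0 n)]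
    congr 1
    omega
  rw [hslice]
  rw [bLoop_eq_fmodel (PySem.List.sorted (russian.take n.toNat) (fun x => x)) _ 0
      (by simpa using PySem.List.sorted_pairwise (russian.take n.toNat) (fun x => x)) hsk]
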